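-- pv_equiv track=rewrite | github.com/vlad-marlo/algorithms | school/mr/hw/var/24.py | solution
-- ===== SOURCE A (Python) =====
-- def solution(data: str) -> int:
--     __max = 0
--     __count = 0
--     for i in data:
--         if i == "Z":
--             __count += 1
--         else:
--             __max = max(__max, __count)
--             __count = 0
--     return __max
-- ===== SOURCE B (Python) =====
-- def solution(data: str) -> int:
--     stops = [i for i, c in enumerate(data) if c != 'Z']
--     return max((b - a - 1 for a, b in zip([-1] + stops, stops)), default=0)
-- ===== Notes on version B (the rewrite author's own statement) =====
-- stated objective: alternative
-- what changed: Replaces the scalar run-counter accumulator loop with a delimiter-index formulation: collect the positions of all non-'Z' characters and take the maximum gap between consecutive delimiter positions (with a -1 sentinel in front), which ignores a trailing 'Z'-run for free because there is no sentinel at the end.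
import Mathlib
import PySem

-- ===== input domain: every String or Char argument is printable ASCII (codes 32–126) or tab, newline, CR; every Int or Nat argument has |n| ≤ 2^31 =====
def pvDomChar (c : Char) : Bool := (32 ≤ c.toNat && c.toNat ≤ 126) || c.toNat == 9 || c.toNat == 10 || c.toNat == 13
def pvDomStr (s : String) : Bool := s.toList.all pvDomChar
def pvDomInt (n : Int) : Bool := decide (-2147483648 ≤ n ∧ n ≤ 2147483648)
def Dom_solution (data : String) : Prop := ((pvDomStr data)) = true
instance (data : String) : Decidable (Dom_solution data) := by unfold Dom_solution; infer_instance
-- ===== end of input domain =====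

-- B replaces A's scalar run-counter loop by a delimiter-index formulation (positions of
-- non-'Z' chars, then max gap between consecutive positions after a -1 sentinel); same cost,
-- alternative decomposition.

-- ===== PORT A =====
-- the two loop variables (__max, __count) become the pair state of a foldl
def stepZ (s : Int × Int) (c : Char) : Int × Int :=
  if c = 'Z' then (s.1, s.2 + 1) else (max s.1 s.2, 0)

def solution (data : String) : Int :=
  (data.toList.foldl stepZ (0, 0)).1

-- ===== PORT B =====
-- [i for i, c in enumerate(data) if c != 'Z']
def stopsOf (l : List Char) : List Int :=
  ((PySem.List.enumerate l).filter (fun p => p.2 != 'Z')).map (·.1)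

-- max(gen, default=0)
def pymax0 (l : List Int) : Int :=
  match l with
  | [] => 0
  | g :: gs => gs.foldl max g

def solution_alt (data : String) : Int :=
  let stops := stopsOf data.toList
  pymax0 ((List.zip ((-1) :: stops) stops).map (fun p => p.2 - p.1 - 1))

-- ===== PRECONDITION & SPEC =====
def Spec_solution (data : String) (out : Int) : Prop := out = solution_alt data
instance (data : String) (out : Int) : Decidable (Spec_solution data out) := by unfold Spec_solution; infer_instance

-- ===== CLAIM (what is proved, stated in full; the proofs are below) =====
def Claim_equal_solution : Prop := ∀ (data : String), Dom_solution data → Spec_solution data (solution data)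

-- ===== LEMMAS AND PROOFS =====

-- B's value on a raw character list
def altOf (l : List Char) : Int :=
  pymax0 ((List.zip ((-1) :: stopsOf l) (stopsOf l)).map (fun p => p.2 - p.1 - 1))

theorem stopsOf_snoc (l : List Char) (c : Char) :
    stopsOf (l ++ [c]) = stopsOf l ++ (if c = 'Z' then [] else [(l.length : Int)]) := by
  simp [stopsOf, PySem.List.enumerate_append, PySem.List.enumerate_cons, List.filter_append]
  by_cases h : c = 'Z' <;> simp [h]

theorem zip_sentinel_snoc (a : Int) (l : List Int) (x : Int) :
    List.zip (a :: (l ++ [x])) (l ++ [x]) =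
      List.zip (a :: l) l ++ [(l.getLastD a, x)] := by
  induction l generalizing a with
  | nil => simp
  | cons b t ih =>
    simp only [List.cons_append, List.zip_cons_cons, List.getLastD_cons]
    rw [ih b]

theorem pymax0_snoc (l : List Int) (x : Int) (hx : 0 ≤ x) :
    pymax0 (l ++ [x]) = max (pymax0 l) x := by
  cases l with
  | nil => simp [pymax0]; omega
  | cons g gs => simp [pymax0, List.foldl_append]

theorem inv (l : List Char) :
    (l.foldl stepZ (0, 0)).1 = altOf l ∧
    (l.foldl stepZ (0, 0)).2 = (l.length : Int) - (stopsOf l).getLastD (-1) - 1 ∧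
    0 ≤ (l.foldl stepZ (0, 0)).2 := by
  induction l using List.reverseRecOn with
  | nil => simp [altOf, stopsOf, pymax0, PySem.List.enumerate]
  | append_singleton l c ih =>
    obtain ⟨h1, h2, h3⟩ := ih
    rw [List.foldl_append]
    by_cases hc : c = 'Z'
    · have hs0 : stopsOf (l ++ [c]) = stopsOf l := by simp [stopsOf_snoc, hc]
      refine ⟨?_, ?_, ?_⟩
      · simp only [List.foldl_cons, List.foldl_nil, stepZ, if_pos hc, altOf, hs0, h1]
      · simp only [List.foldl_cons, List.foldl_nil, stepZ, if_pos hc, hs0, List.length_append,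
          List.length_cons, List.length_nil]
        push_cast
        omega
      · simp only [List.foldl_cons, List.foldl_nil, stepZ, if_pos hc]
        omega
    · have hs : stopsOf (l ++ [c]) = stopsOf l ++ [(l.length : Int)] := by
        simp [stopsOf_snoc, hc]
      have halt : altOf (l ++ [c]) = max (altOf l) ((l.foldl stepZ (0, 0)).2) := by
        rw [altOf, hs, zip_sentinel_snoc, List.map_append]
        simp only [List.map_cons, List.map_nil]
        rw [pymax0_snoc _ _ (by omega)]
        rw [← h2, altOf]
      refine ⟨?_, ?_, ?_⟩
      · simp [List.foldl_cons, stepZ, hc, halt, h1]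
      · simp [List.foldl_cons, stepZ, hc, hs, List.length_append]
      · simp [List.foldl_cons, stepZ, hc]

-- ===== VERDICT (by name: the statement is the Claim_ definition above) =====
theorem solution_spec : Claim_equal_solution := by
  intro data _
  unfold Spec_solution solution solution_alt
  exact (inv data.toList).1
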